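-- pv_equiv track=rewrite | github.com/pr-poehali-dev/virtual-fitting-room | backend/colortype-status/index.py | get_all_colortype_params
-- ===== SOURCE A (Python) =====
-- COLORTYPE_MAP = {
--     ('COOL-UNDERTONE', 'LIGHT-COLORS', 'BRIGHT-SATURATION-COLORS', 'LOW-CONTRAST'): 'SOFT SUMMER',
--     ('COOL-UNDERTONE', 'LIGHT-COLORS', 'NEUTRAL-SATURATION-COLORS', 'LOW-CONTRAST'): 'SOFT SUMMER',
--     ('COOL-UNDERTONE', 'LIGHT-COLORS', 'MUTED-SATURATION-COLORS', 'LOW-CONTRAST'): 'SOFT SUMMER',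
--     ('COOL-UNDERTONE', 'MEDIUM-LIGHTNESS-COLORS', 'NEUTRAL-SATURATION-COLORS', 'LOW-CONTRAST'): 'VIVID SUMMER',
--     ('COOL-UNDERTONE', 'MEDIUM-LIGHTNESS-COLORS', 'NEUTRAL-SATURATION-COLORS', 'MEDIUM-CONTRAST'): 'VIVID SUMMER',
--     ('COOL-UNDERTONE', 'LIGHT-COLORS', 'NEUTRAL-SATURATION-COLORS', 'MEDIUM-CONTRAST'): 'VIVID SUMMER',
--     ('COOL-UNDERTONE', 'MEDIUM-LIGHTNESS-COLORS', 'MUTED-SATURATION-COLORS', 'MEDIUM-CONTRAST'): 'DUSTY SUMMER',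
--     ('COOL-UNDERTONE', 'MEDIUM-LIGHTNESS-COLORS', 'MUTED-SATURATION-COLORS', 'LOW-CONTRAST'): 'DUSTY SUMMER',
--     ('COOL-UNDERTONE', 'LIGHT-COLORS', 'MUTED-SATURATION-COLORS', 'MEDIUM-CONTRAST'): 'DUSTY SUMMER',
--
--     ('WARM-UNDERTONE', 'MEDIUM-LIGHTNESS-COLORS', 'MUTED-SATURATION-COLORS', 'LOW-CONTRAST'): 'GENTLE AUTUMN',
--     ('WARM-UNDERTONE', 'MEDIUM-LIGHTNESS-COLORS', 'NEUTRAL-SATURATION-COLORS', 'MEDIUM-CONTRAST'): 'GENTLE AUTUMN',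
--     ('WARM-UNDERTONE', 'LIGHT-COLORS', 'MUTED-SATURATION-COLORS', 'MEDIUM-CONTRAST'): 'GENTLE AUTUMN',
--     ('WARM-UNDERTONE', 'LIGHT-COLORS', 'NEUTRAL-SATURATION-COLORS', 'MEDIUM-CONTRAST'): 'GENTLE AUTUMN',
--     ('WARM-UNDERTONE', 'MEDIUM-LIGHTNESS-COLORS', 'BRIGHT-SATURATION-COLORS', 'MEDIUM-CONTRAST'): 'FIERY AUTUMN',
--     ('WARM-UNDERTONE', 'MEDIUM-LIGHTNESS-COLORS', 'NEUTRAL-SATURATION-COLORS', 'HIGH-CONTRAST'): 'FIERY AUTUMN',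
--     ('WARM-UNDERTONE', 'DEEP-COLORS', 'NEUTRAL-SATURATION-COLORS', 'MEDIUM-CONTRAST'): 'VIVID AUTUMN',
--     ('WARM-UNDERTONE', 'DEEP-COLORS', 'NEUTRAL-SATURATION-COLORS', 'HIGH-CONTRAST'): 'VIVID AUTUMN',
--
--     ('COOL-UNDERTONE', 'DEEP-COLORS', 'NEUTRAL-SATURATION-COLORS', 'MEDIUM-CONTRAST'): 'VIVID WINTER',
--     ('COOL-UNDERTONE', 'DEEP-COLORS', 'BRIGHT-SATURATION-COLORS', 'MEDIUM-CONTRAST'): 'VIVID WINTER',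
--     ('COOL-UNDERTONE', 'DEEP-COLORS', 'NEUTRAL-SATURATION-COLORS', 'HIGH-CONTRAST'): 'VIVID WINTER',
--     ('COOL-UNDERTONE', 'MEDIUM-LIGHTNESS-COLORS', 'NEUTRAL-SATURATION-COLORS', 'HIGH-CONTRAST'): 'SOFT WINTER',
--     ('COOL-UNDERTONE', 'DEEP-COLORS', 'MUTED-SATURATION-COLORS', 'MEDIUM-CONTRAST'): 'SOFT WINTER',
--     ('COOL-UNDERTONE', 'DEEP-COLORS', 'BRIGHT-SATURATION-COLORS', 'HIGH-CONTRAST'): 'BRIGHT WINTER',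
--     ('COOL-UNDERTONE', 'MEDIUM-LIGHTNESS-COLORS', 'BRIGHT-SATURATION-COLORS', 'HIGH-CONTRAST'): 'BRIGHT WINTER',
--
--     ('WARM-UNDERTONE', 'LIGHT-COLORS', 'BRIGHT-SATURATION-COLORS', 'HIGH-CONTRAST'): 'VIBRANT SPRING',
--     ('WARM-UNDERTONE', 'MEDIUM-LIGHTNESS-COLORS', 'BRIGHT-SATURATION-COLORS', 'HIGH-CONTRAST'): 'VIBRANT SPRING',
--     ('WARM-UNDERTONE', 'MEDIUM-LIGHTNESS-COLORS', 'BRIGHT-SATURATION-COLORS', 'MEDIUM-CONTRAST'): 'BRIGHT SPRING',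
--     ('WARM-UNDERTONE', 'MEDIUM-LIGHTNESS-COLORS', 'BRIGHT-SATURATION-COLORS', 'LOW-CONTRAST'): 'BRIGHT SPRING',
--     ('WARM-UNDERTONE', 'LIGHT-COLORS', 'BRIGHT-SATURATION-COLORS', 'MEDIUM-CONTRAST'): 'BRIGHT SPRING',
--     ('WARM-UNDERTONE', 'LIGHT-COLORS', 'BRIGHT-SATURATION-COLORS', 'LOW-CONTRAST'): 'GENTLE SPRING',
--     ('WARM-UNDERTONE', 'LIGHT-COLORS', 'NEUTRAL-SATURATION-COLORS', 'LOW-CONTRAST'): 'GENTLE SPRING',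
--
--
--
--
--
--
--
-- }
--
-- def get_all_colortype_params(colortype: str) -> list:
--     '''Get ALL parameter combinations for a colortype from COLORTYPE_MAP
--
--     Returns: List of dicts with all possible parameter combinations for this colortype
--     (Updated: checks all combinations instead of first match)
--     '''
--     params_list = []
--     for (undertone, lightness, saturation, contrast), ct in COLORTYPE_MAP.items():
--         if ct == colortype:
--             params_list.append({
--                 'undertone': undertone,
--                 'lightness': lightness,
--                 'saturation': saturation,
--                 'contrast': contrast
--             })
--     return params_list
-- ===== SOURCE B (Python) =====
-- # Compact reverse table: colortype -> list of 4-letter codes (undertone, lightness,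
-- # saturation, contrast), expanded to full dicts on lookup.
--
-- _UNDERTONE = {'C': 'COOL-UNDERTONE', 'W': 'WARM-UNDERTONE'}
-- _LIGHTNESS = {'L': 'LIGHT-COLORS', 'M': 'MEDIUM-LIGHTNESS-COLORS', 'D': 'DEEP-COLORS'}
-- _SATURATION = {'B': 'BRIGHT-SATURATION-COLORS', 'N': 'NEUTRAL-SATURATION-COLORS', 'U': 'MUTED-SATURATION-COLORS'}
-- _CONTRAST = {'L': 'LOW-CONTRAST', 'M': 'MEDIUM-CONTRAST', 'H': 'HIGH-CONTRAST'}
--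
-- _REVERSE = {
--     'SOFT SUMMER': ['CLBL', 'CLNL', 'CLUL'],
--     'VIVID SUMMER': ['CMNL', 'CMNM', 'CLNM'],
--     'DUSTY SUMMER': ['CMUM', 'CMUL', 'CLUM'],
--     'GENTLE AUTUMN': ['WMUL', 'WMNM', 'WLUM', 'WLNM'],
--     'BRIGHT SPRING': ['WMBM', 'WMBL', 'WLBM'],
--     'FIERY AUTUMN': ['WMNH'],
--     'VIVID AUTUMN': ['WDNM', 'WDNH'],
--     'VIVID WINTER': ['CDNM', 'CDBM', 'CDNH'],
--     'SOFT WINTER': ['CMNH', 'CDUM'],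
--     'BRIGHT WINTER': ['CDBH', 'CMBH'],
--     'VIBRANT SPRING': ['WLBH', 'WMBH'],
--     'GENTLE SPRING': ['WLBL', 'WLNL'],
-- }
--
--
-- def get_all_colortype_params(colortype: str) -> list:
--     '''Get ALL parameter combinations for a colortype from the compact reverse table.'''
--     return [
--         {
--             'undertone': _UNDERTONE[u],
--             'lightness': _LIGHTNESS[l],
--             'saturation': _SATURATION[s],
--             'contrast': _CONTRAST[c],
--         }
--         for u, l, s, c in _REVERSE.get(colortype, [])
--     ]
-- ===== Notes on version B (the rewrite author's own statement) =====
-- stated objective: alternative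
-- what changed: Replaces A's per-call scan/filter of COLORTYPE_MAP with a hand-maintained compact reverse table (colortype -> list of 4-letter codes) plus small expansion tables; the function is one dict lookup followed by decoding each code into a param dict.
import Mathlib
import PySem

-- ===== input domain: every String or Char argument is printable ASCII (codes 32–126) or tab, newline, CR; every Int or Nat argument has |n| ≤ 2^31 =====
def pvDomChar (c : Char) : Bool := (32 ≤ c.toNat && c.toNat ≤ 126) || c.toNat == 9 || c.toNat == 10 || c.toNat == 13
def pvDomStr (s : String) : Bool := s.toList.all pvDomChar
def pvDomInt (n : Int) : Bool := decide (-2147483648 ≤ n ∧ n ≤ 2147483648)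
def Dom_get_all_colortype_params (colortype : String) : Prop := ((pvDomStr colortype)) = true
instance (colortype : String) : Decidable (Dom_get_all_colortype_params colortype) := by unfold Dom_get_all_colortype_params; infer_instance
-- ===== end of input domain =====

-- B replaces A's per-call scan of COLORTYPE_MAP with a compact reverse table (colortype -> 4-letter codes) decoded on lookup (alternative data structure, same results).

-- ===== PORT A =====
-- COLORTYPE_MAP.items(): the dict literal has ONE duplicate key
-- (WARM/MEDIUM/BRIGHT/MEDIUM), which Python keeps at its first position with the
-- last value 'BRIGHT SPRING'; the list below is the resulting insertion order.
def COLORTYPE_MAP : List ((String × String × String × String) × String) := [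
  (("COOL-UNDERTONE", "LIGHT-COLORS", "BRIGHT-SATURATION-COLORS", "LOW-CONTRAST"), "SOFT SUMMER"),
  (("COOL-UNDERTONE", "LIGHT-COLORS", "NEUTRAL-SATURATION-COLORS", "LOW-CONTRAST"), "SOFT SUMMER"),
  (("COOL-UNDERTONE", "LIGHT-COLORS", "MUTED-SATURATION-COLORS", "LOW-CONTRAST"), "SOFT SUMMER"),
  (("COOL-UNDERTONE", "MEDIUM-LIGHTNESS-COLORS", "NEUTRAL-SATURATION-COLORS", "LOW-CONTRAST"), "VIVID SUMMER"),
  (("COOL-UNDERTONE", "MEDIUM-LIGHTNESS-COLORS", "NEUTRAL-SATURATION-COLORS", "MEDIUM-CONTRAST"), "VIVID SUMMER"),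
  (("COOL-UNDERTONE", "LIGHT-COLORS", "NEUTRAL-SATURATION-COLORS", "MEDIUM-CONTRAST"), "VIVID SUMMER"),
  (("COOL-UNDERTONE", "MEDIUM-LIGHTNESS-COLORS", "MUTED-SATURATION-COLORS", "MEDIUM-CONTRAST"), "DUSTY SUMMER"),
  (("COOL-UNDERTONE", "MEDIUM-LIGHTNESS-COLORS", "MUTED-SATURATION-COLORS", "LOW-CONTRAST"), "DUSTY SUMMER"),
  (("COOL-UNDERTONE", "LIGHT-COLORS", "MUTED-SATURATION-COLORS", "MEDIUM-CONTRAST"), "DUSTY SUMMER"),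
  (("WARM-UNDERTONE", "MEDIUM-LIGHTNESS-COLORS", "MUTED-SATURATION-COLORS", "LOW-CONTRAST"), "GENTLE AUTUMN"),
  (("WARM-UNDERTONE", "MEDIUM-LIGHTNESS-COLORS", "NEUTRAL-SATURATION-COLORS", "MEDIUM-CONTRAST"), "GENTLE AUTUMN"),
  (("WARM-UNDERTONE", "LIGHT-COLORS", "MUTED-SATURATION-COLORS", "MEDIUM-CONTRAST"), "GENTLE AUTUMN"),
  (("WARM-UNDERTONE", "LIGHT-COLORS", "NEUTRAL-SATURATION-COLORS", "MEDIUM-CONTRAST"), "GENTLE AUTUMN"),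
  (("WARM-UNDERTONE", "MEDIUM-LIGHTNESS-COLORS", "BRIGHT-SATURATION-COLORS", "MEDIUM-CONTRAST"), "BRIGHT SPRING"),
  (("WARM-UNDERTONE", "MEDIUM-LIGHTNESS-COLORS", "NEUTRAL-SATURATION-COLORS", "HIGH-CONTRAST"), "FIERY AUTUMN"),
  (("WARM-UNDERTONE", "DEEP-COLORS", "NEUTRAL-SATURATION-COLORS", "MEDIUM-CONTRAST"), "VIVID AUTUMN"),
  (("WARM-UNDERTONE", "DEEP-COLORS", "NEUTRAL-SATURATION-COLORS", "HIGH-CONTRAST"), "VIVID AUTUMN"),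
  (("COOL-UNDERTONE", "DEEP-COLORS", "NEUTRAL-SATURATION-COLORS", "MEDIUM-CONTRAST"), "VIVID WINTER"),
  (("COOL-UNDERTONE", "DEEP-COLORS", "BRIGHT-SATURATION-COLORS", "MEDIUM-CONTRAST"), "VIVID WINTER"),
  (("COOL-UNDERTONE", "DEEP-COLORS", "NEUTRAL-SATURATION-COLORS", "HIGH-CONTRAST"), "VIVID WINTER"),
  (("COOL-UNDERTONE", "MEDIUM-LIGHTNESS-COLORS", "NEUTRAL-SATURATION-COLORS", "HIGH-CONTRAST"), "SOFT WINTER"),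
  (("COOL-UNDERTONE", "DEEP-COLORS", "MUTED-SATURATION-COLORS", "MEDIUM-CONTRAST"), "SOFT WINTER"),
  (("COOL-UNDERTONE", "DEEP-COLORS", "BRIGHT-SATURATION-COLORS", "HIGH-CONTRAST"), "BRIGHT WINTER"),
  (("COOL-UNDERTONE", "MEDIUM-LIGHTNESS-COLORS", "BRIGHT-SATURATION-COLORS", "HIGH-CONTRAST"), "BRIGHT WINTER"),
  (("WARM-UNDERTONE", "LIGHT-COLORS", "BRIGHT-SATURATION-COLORS", "HIGH-CONTRAST"), "VIBRANT SPRING"),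
  (("WARM-UNDERTONE", "MEDIUM-LIGHTNESS-COLORS", "BRIGHT-SATURATION-COLORS", "HIGH-CONTRAST"), "VIBRANT SPRING"),
  (("WARM-UNDERTONE", "MEDIUM-LIGHTNESS-COLORS", "BRIGHT-SATURATION-COLORS", "LOW-CONTRAST"), "BRIGHT SPRING"),
  (("WARM-UNDERTONE", "LIGHT-COLORS", "BRIGHT-SATURATION-COLORS", "MEDIUM-CONTRAST"), "BRIGHT SPRING"),
  (("WARM-UNDERTONE", "LIGHT-COLORS", "BRIGHT-SATURATION-COLORS", "LOW-CONTRAST"), "GENTLE SPRING"),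
  (("WARM-UNDERTONE", "LIGHT-COLORS", "NEUTRAL-SATURATION-COLORS", "LOW-CONTRAST"), "GENTLE SPRING")
]

def get_all_colortype_params (colortype : String) : List (List (String × String)) :=
  COLORTYPE_MAP.foldl (fun params_list e =>
    if e.2 == colortype then
      params_list ++ [[("undertone", e.1.1), ("lightness", e.1.2.1),
                       ("saturation", e.1.2.2.1), ("contrast", e.1.2.2.2)]]
    else params_list) []

-- ===== PORT B =====
-- the small expansion tables (_UNDERTONE[u] etc.; every code in _REVERSE is a key,
-- so the Python [] lookups never raise)
def pvUndertone (u : Char) : String :=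
  if u == 'C' then "COOL-UNDERTONE" else "WARM-UNDERTONE"
def pvLightness (l : Char) : String :=
  if l == 'L' then "LIGHT-COLORS" else if l == 'M' then "MEDIUM-LIGHTNESS-COLORS" else "DEEP-COLORS"
def pvSaturation (s : Char) : String :=
  if s == 'B' then "BRIGHT-SATURATION-COLORS" else if s == 'N' then "NEUTRAL-SATURATION-COLORS" else "MUTED-SATURATION-COLORS"
def pvContrast (c : Char) : String :=
  if c == 'L' then "LOW-CONTRAST" else if c == 'M' then "MEDIUM-CONTRAST" else "HIGH-CONTRAST"

-- _REVERSE: the hand-maintained compact table, colortype -> list of 4-letter codes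
-- (a Python dict literal = successive insertions into an empty dict)
def pvREVERSE : PySem.Dict String (List String) :=
  (((((((((((PySem.Dict.empty.insert "SOFT SUMMER" ["CLBL", "CLNL", "CLUL"]).insert
    "VIVID SUMMER" ["CMNL", "CMNM", "CLNM"]).insert
    "DUSTY SUMMER" ["CMUM", "CMUL", "CLUM"]).insert
    "GENTLE AUTUMN" ["WMUL", "WMNM", "WLUM", "WLNM"]).insert
    "BRIGHT SPRING" ["WMBM", "WMBL", "WLBM"]).insert
    "FIERY AUTUMN" ["WMNH"]).insert
    "VIVID AUTUMN" ["WDNM", "WDNH"]).insert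
    "VIVID WINTER" ["CDNM", "CDBM", "CDNH"]).insert
    "SOFT WINTER" ["CMNH", "CDUM"]).insert
    "BRIGHT WINTER" ["CDBH", "CMBH"]).insert
    "VIBRANT SPRING" ["WLBH", "WMBH"]).insert
    "GENTLE SPRING" ["WLBL", "WLNL"]

-- decode one 4-letter code "ulsc" into the param dict (the comprehension body)
def pvDecode (code : String) : List (String × String) :=
  match code.toList with
  | [u, l, s, c] =>
      [("undertone", pvUndertone u), ("lightness", pvLightness l),
       ("saturation", pvSaturation s), ("contrast", pvContrast c)]
  | _ => []

def get_all_colortype_params_alt (colortype : String) : List (List (String × String)) :=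
  (pvREVERSE.getD colortype []).map pvDecode

-- ===== PRECONDITION & SPEC =====
def Spec_get_all_colortype_params (colortype : String) (out : List (List (String × String))) : Prop := out = get_all_colortype_params_alt colortype
instance (colortype : String) (out : List (List (String × String))) : Decidable (Spec_get_all_colortype_params colortype out) := by unfold Spec_get_all_colortype_params; infer_instance

-- ===== CLAIM (what is proved, stated in full; the proofs are below) =====
def Claim_equal_get_all_colortype_params : Prop := ∀ (colortype : String), Dom_get_all_colortype_params colortype → Spec_get_all_colortype_params colortype (get_all_colortype_params colortype)

-- ===== LEMMAS AND PROOFS =====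

-- the 13 colortype names occurring anywhere in either table
def pvNames : List String :=
  ["SOFT SUMMER", "VIVID SUMMER", "DUSTY SUMMER", "GENTLE AUTUMN", "BRIGHT SPRING",
   "FIERY AUTUMN", "VIVID AUTUMN", "VIVID WINTER", "SOFT WINTER", "BRIGHT WINTER",
   "VIBRANT SPRING", "GENTLE SPRING"]

-- outside the 12 names, A's loop never appends
theorem portA_unknown (c : String) (h : c ∉ pvNames) : get_all_colortype_params c = [] := by
  unfold get_all_colortype_params COLORTYPE_MAP
  simp only [pvNames, List.mem_cons, List.not_mem_nil, or_false, not_or] at h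
  obtain ⟨h1, h2, h3, h4, h5, h6, h7, h8, h9, h10, h11, h12⟩ := h
  simp [List.foldl, beq_iff_eq, Ne.symm h1, Ne.symm h2, Ne.symm h3, Ne.symm h4,
    Ne.symm h5, Ne.symm h6, Ne.symm h7, Ne.symm h8, Ne.symm h9, Ne.symm h10,
    Ne.symm h11, Ne.symm h12]

-- outside the 12 names, B's lookup misses
theorem portB_unknown (c : String) (h : c ∉ pvNames) : get_all_colortype_params_alt c = [] := by
  unfold get_all_colortype_params_alt pvREVERSE
  simp only [pvNames, List.mem_cons, List.not_mem_nil, or_false, not_or] at h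
  obtain ⟨h1, h2, h3, h4, h5, h6, h7, h8, h9, h10, h11, h12⟩ := h
  simp [PySem.Dict.getD_insert, PySem.Dict.getD_empty, h1, h2, h3, h4, h5, h6,
    h7, h8, h9, h10, h11, h12]

-- ===== VERDICT (by name: the statement is the Claim_ definition above) =====
theorem get_all_colortype_params_spec : Claim_equal_get_all_colortype_params := by
  intro c _
  unfold Spec_get_all_colortype_params
  by_cases h : c ∈ pvNames
  · simp only [pvNames, List.mem_cons, List.not_mem_nil, or_false] at h
    rcases h with rfl | rfl | rfl | rfl | rfl | rfl | rfl | rfl | rfl | rfl | rfl | rfl <;> rfl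
  · rw [portA_unknown c h, portB_unknown c h]
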